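-- pv_equiv track=rewrite | github.com/4rcan31/SolveSystemEcuation | Laplace.py | pullApartData
-- ===== SOURCE A (Python) =====
-- def pullApartData(data):
--     right = []
--     left = []
--     for equations in data:
--         x = 0
--         for constants in equations:
--             x += 1
--             if x != len(equations):
--                 left.append(constants)
--             else:
--                 right.append(constants)
--     return [left, right]
-- ===== SOURCE B (Python) =====
-- def pullApartData(data):
--     return [[c for equations in data for c in equations[:-1]],
--             [equations[-1] for equations in data if equations]]
-- ===== Notes on version B (the rewrite author's own statement) =====
-- stated objective: simpler
-- what changed: Replaces the nested loops with a per-element position counter by two independent comprehensions: the left side is the concatenation of each equation's slice [:-1], the right side collects each non-empty equation's last element.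
import Mathlib
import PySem

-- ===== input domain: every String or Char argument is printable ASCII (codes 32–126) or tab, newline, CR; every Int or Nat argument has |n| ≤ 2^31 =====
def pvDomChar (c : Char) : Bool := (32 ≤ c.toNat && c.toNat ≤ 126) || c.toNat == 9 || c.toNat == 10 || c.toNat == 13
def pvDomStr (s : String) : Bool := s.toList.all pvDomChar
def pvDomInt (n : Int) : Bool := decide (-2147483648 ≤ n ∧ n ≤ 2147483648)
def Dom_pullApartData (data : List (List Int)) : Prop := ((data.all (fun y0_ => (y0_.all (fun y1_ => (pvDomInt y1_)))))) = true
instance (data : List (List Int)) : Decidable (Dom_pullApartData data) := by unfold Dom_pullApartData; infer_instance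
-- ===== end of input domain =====

-- B replaces A's nested loops with per-element counter by two independent comprehensions (slice [:-1] / last element); simpler, same cost.


-- ===== PORT A =====
-- inner loop body: x += 1; if x != len(equations): left.append(c) else right.append(c)
def pvInnerA (n : Int) (s : List Int × List Int × Int) (c : Int) : List Int × List Int × Int :=
  let x := s.2.2 + 1
  if x ≠ n then (s.1 ++ [c], s.2.1, x) else (s.1, s.2.1 ++ [c], x)

def pullApartData (data : List (List Int)) : List (List Int) :=
  let lr := data.foldl (fun (acc : List Int × List Int) equations =>
    let s := equations.foldl (pvInnerA (equations.length : Int)) (acc.1, acc.2, (0 : Int))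
    (s.1, s.2.1)) ([], [])
  [lr.1, lr.2]

-- ===== PORT B =====
def pullApartData_alt (data : List (List Int)) : List (List Int) :=
  [data.flatMap (fun equations => equations.dropLast),
   data.filterMap (fun equations => equations.getLast?)]

-- ===== PRECONDITION & SPEC =====
def Spec_pullApartData (data : List (List Int)) (out : List (List Int)) : Prop := out = pullApartData_alt data
instance (data : List (List Int)) (out : List (List Int)) : Decidable (Spec_pullApartData data out) := by unfold Spec_pullApartData; infer_instance

-- ===== CLAIM (what is proved, stated in full; the proofs are below) =====
def Claim_equal_pullApartData : Prop := ∀ (data : List (List Int)), Dom_pullApartData data → Spec_pullApartData data (pullApartData data)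

-- ===== LEMMAS AND PROOFS =====

-- A's inner loop over a suffix t, counter k, against the fixed length n of the full equation:
-- while x ≠ n it appends to left; at the last element (x = n) it appends to right.
lemma pvInnerA_spec (t : List Int) (l r : List Int) (k n : Int) (h : k + t.length = n) :
    t.foldl (pvInnerA n) (l, r, k) = (l ++ t.dropLast, r ++ t.getLast?.toList, n) := by
  induction t generalizing l r k with
  | nil => simp at h; simp [h]
  | cons c t' ih =>
    cases t' with
    | nil =>
      have hk : k + 1 = n := by simpa using h
      simp [List.foldl, pvInnerA, hk]
    | cons d t'' =>
      have hne : k + 1 ≠ n := by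
        simp only [List.length_cons] at h; push_cast at h; omega
      have h' : (k + 1) + ((d :: t'').length : Int) = n := by
        simp only [List.length_cons] at h ⊢; push_cast at h ⊢; omega
      rw [List.foldl_cons,
          show pvInnerA n (l, r, k) c = (l ++ [c], r, k + 1) from by simp [pvInnerA, hne],
          ih (l ++ [c]) r (k + 1) h']
      simp

lemma pvOuter_spec (data : List (List Int)) (l r : List Int) :
    data.foldl (fun (acc : List Int × List Int) equations =>
        let s := equations.foldl (pvInnerA (equations.length : Int)) (acc.1, acc.2, (0 : Int))
        (s.1, s.2.1)) (l, r)
      = (l ++ data.flatMap (fun eq => eq.dropLast),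
         r ++ data.filterMap (fun eq => eq.getLast?)) := by
  induction data generalizing l r with
  | nil => simp
  | cons eq rest ih =>
    simp only [List.foldl_cons]
    rw [show (eq.foldl (pvInnerA (eq.length : Int)) (l, r, (0:Int)))
          = (l ++ eq.dropLast, r ++ eq.getLast?.toList, (eq.length : Int))
        from pvInnerA_spec eq l r 0 eq.length (by simp)]
    rw [ih]
    cases h : eq.getLast? <;> simp [List.flatMap_cons, h, List.append_assoc]

-- ===== VERDICT (by name: the statement is the Claim_ definition above) =====
theorem pullApartData_spec : Claim_equal_pullApartData := by
  intro data _
  unfold Spec_pullApartData pullApartData pullApartData_alt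
  rw [pvOuter_spec]
  simp
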